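-- pv_equiv track=rewrite | github.com/huanhuan233/OpticalFilmTransformer | optogpt/optogpt_backend/optogpt_api/views.py | clean_tokens
-- ===== SOURCE A (Python) =====
-- from typing import List, Tuple, Dict, Any
--
-- SPECIAL = {"BOS", "EOS", "PAD", "UNK", None, ""}
--
-- def clean_tokens(tokens: List[str]) -> List[str]:
--     out = []
--     for tok in tokens:
--         if tok in SPECIAL:
--             if tok == "EOS":
--                 break
--             continue
--         out.append(tok)
--     return out
-- ===== SOURCE B (Python) =====
-- from typing import List
--
-- SPECIAL = {"BOS", "EOS", "PAD", "UNK", None, ""}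
--
-- def clean_tokens(tokens: List[str]) -> List[str]:
--     prefix = tokens[:tokens.index("EOS")] if "EOS" in tokens else tokens
--     return [t for t in prefix if t not in SPECIAL]
-- ===== Notes on version B (the rewrite author's own statement) =====
-- stated objective: simpler
-- what changed: Replaces the single loop with break/continue by two passes: first truncate the list at the first EOS via index(), then filter out special tokens with one comprehension.
import Mathlib
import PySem

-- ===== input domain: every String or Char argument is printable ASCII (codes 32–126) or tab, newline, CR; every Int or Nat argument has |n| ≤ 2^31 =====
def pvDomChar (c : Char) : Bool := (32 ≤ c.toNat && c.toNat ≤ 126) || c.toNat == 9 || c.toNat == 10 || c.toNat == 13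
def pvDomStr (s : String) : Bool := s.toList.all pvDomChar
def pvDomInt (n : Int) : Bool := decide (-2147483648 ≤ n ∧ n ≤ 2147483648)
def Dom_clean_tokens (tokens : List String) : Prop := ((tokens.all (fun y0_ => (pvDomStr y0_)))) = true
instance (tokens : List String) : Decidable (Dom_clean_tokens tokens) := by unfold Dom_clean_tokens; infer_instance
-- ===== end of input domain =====

-- B is a simpler two-pass decomposition: truncate at the first EOS, then filter specials.

-- SPECIAL as seen by str tokens (None can never equal a str under Python's ==)
def pvSpecial : List String := ["BOS", "EOS", "PAD", "UNK", ""]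

-- ===== PORT A =====
-- loop with continue/break, transcribed as structural recursion over the same traversal
def clean_tokens (tokens : List String) : List String :=
  match tokens with
  | [] => []
  | tok :: rest =>
      if tok ∈ pvSpecial then
        if tok = "EOS" then []      -- break
        else clean_tokens rest      -- continue
      else tok :: clean_tokens rest

-- ===== PORT B =====
def clean_tokens_alt (tokens : List String) : List String :=
  let prefix_ :=
    if "EOS" ∈ tokens then
      match PySem.List.index? tokens "EOS" with
      | some k => PySem.List.slice tokens none (some (k : Int))   -- tokens[:tokens.index("EOS")]
      | none => tokens                                            -- unreachable under the guard
    else tokens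
  prefix_.filter (fun t => t ∉ pvSpecial)

-- ===== PRECONDITION & SPEC =====
def Spec_clean_tokens (tokens : List String) (out : List String) : Prop := out = clean_tokens_alt tokens
instance (tokens : List String) (out : List String) : Decidable (Spec_clean_tokens tokens out) := by unfold Spec_clean_tokens; infer_instance

-- ===== CLAIM (what is proved, stated in full; the proofs are below) =====
def Claim_equal_clean_tokens : Prop := ∀ (tokens : List String), Dom_clean_tokens tokens → Spec_clean_tokens tokens (clean_tokens tokens)

-- ===== LEMMAS AND PROOFS =====

theorem clean_tokens_alt_no_eos (tokens : List String) (h : "EOS" ∉ tokens) :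
    clean_tokens_alt tokens = tokens.filter (fun t => t ∉ pvSpecial) := by
  simp [clean_tokens_alt, h]

theorem clean_tokens_alt_mem (tokens : List String) (k : Nat)
    (hk : PySem.List.index? tokens "EOS" = some k) :
    clean_tokens_alt tokens = (tokens.take k).filter (fun t => t ∉ pvSpecial) := by
  have hmem : "EOS" ∈ tokens := (PySem.List.index?_isSome_iff tokens "EOS").mp (by rw [hk]; rfl)
  simp only [clean_tokens_alt, hmem, if_pos, hk, PySem.List.slice_to_natCast]

theorem clean_tokens_eq (tokens : List String) :
    clean_tokens tokens = clean_tokens_alt tokens := by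
  induction tokens with
  | nil => simp [clean_tokens, clean_tokens_alt]
  | cons tok rest ih =>
    by_cases heos : tok = "EOS"
    · subst heos
      rw [clean_tokens_alt_mem ("EOS" :: rest) 0 (PySem.List.index?_cons_self _ _)]
      simp [clean_tokens, pvSpecial]
    · by_cases hmem : "EOS" ∈ rest
      · obtain ⟨k, hk⟩ := Option.isSome_iff_exists.mp
          ((PySem.List.index?_isSome_iff rest "EOS").mpr hmem)
        have hidx : PySem.List.index? (tok :: rest) "EOS" = some (k + 1) := by
          rw [PySem.List.index?_cons_of_ne rest heos, hk]; rfl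
        rw [clean_tokens_alt_mem _ _ hidx]
        rw [clean_tokens_alt_mem rest k hk] at ih
        by_cases hsp : tok ∈ pvSpecial
        · simp [clean_tokens, hsp, heos, ih, List.take_succ_cons]
        · simp [clean_tokens, hsp, ih, List.take_succ_cons]
      · have hmem2 : "EOS" ∉ tok :: rest := by
          simp only [List.mem_cons, not_or]
          exact ⟨fun h => heos h.symm, hmem⟩
        rw [clean_tokens_alt_no_eos _ hmem2]
        rw [clean_tokens_alt_no_eos _ hmem] at ih
        by_cases hsp : tok ∈ pvSpecial
        · simp [clean_tokens, hsp, heos, ih, List.filter]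
        · simp [clean_tokens, hsp, ih, List.filter]

-- ===== VERDICT (by name: the statement is the Claim_ definition above) =====
theorem clean_tokens_spec : Claim_equal_clean_tokens := by
  intro tokens _
  unfold Spec_clean_tokens
  exact clean_tokens_eq tokens
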